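-- pv_equiv track=rewrite | github.com/ommfinance/openmoneymarket-mono | score/delegation/Math.py | exaPow
-- ===== SOURCE A (Python) =====
-- EXA = 10 ** 18
--
-- halfEXA = EXA // 2
--
-- def exaMul(a: int, b: int) -> int:
--     return (halfEXA + (a * b)) // EXA
--
-- def exaPow(x: int, n: int) -> int:
--     z = x if n % 2 != 0 else EXA
--
--     n = n // 2
--     while n != 0:
--         x = exaMul(x, x)
--
--         if n % 2 != 0:
--             z = exaMul(z, x)
--
--         n = n // 2
--
--     return z
-- ===== SOURCE B (Python) =====
-- EXA = 10 ** 18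
--
-- halfEXA = EXA // 2
--
-- def exaMul(a: int, b: int) -> int:
--     return (halfEXA + (a * b)) // EXA
--
-- def exaPow(x: int, n: int) -> int:
--     # Pass 1: consume the exponent, recording (bit, current square).
--     squares = []
--     while n != 0:
--         squares.append((n % 2, x))
--         x = exaMul(x, x)
--         n //= 2
--     # Pass 2: fold over the set bits in increasing bit order.
--     z = EXA
--     for bit, s in squares:
--         if bit:
--             z = exaMul(z, s)
--     return z
-- ===== Notes on version B (the rewrite author's own statement) =====
-- stated objective: alternative
-- what changed: Single fused square-and-multiply loop replaced by two passes: first build the list of (exponent bit, successive fixed-point square) pairs, then fold z = EXA over the set bits with exaMul; pass 2 uses that exaMul(EXA, s) = s so no special bit-0 initialisation is needed.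
import Mathlib
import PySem

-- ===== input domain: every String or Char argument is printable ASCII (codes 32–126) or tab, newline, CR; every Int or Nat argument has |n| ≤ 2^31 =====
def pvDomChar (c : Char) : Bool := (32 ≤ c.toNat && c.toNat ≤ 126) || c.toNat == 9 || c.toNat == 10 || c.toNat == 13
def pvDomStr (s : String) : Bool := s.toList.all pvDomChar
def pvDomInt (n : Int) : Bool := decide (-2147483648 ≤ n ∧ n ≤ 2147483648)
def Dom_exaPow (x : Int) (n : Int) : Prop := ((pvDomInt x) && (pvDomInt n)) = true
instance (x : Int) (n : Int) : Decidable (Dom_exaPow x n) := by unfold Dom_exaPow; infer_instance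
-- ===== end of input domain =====

-- B replaces A's fused square-and-multiply loop by two passes (build bit/square list, then fold over set bits); alternative decomposition, same cost.
-- Pre_ excludes n < 0, where Python A never returns (the `while n != 0` / `n //= 2` loop diverges).


-- ===== PORT A =====
def EXA : Int := 10 ^ 18

def halfEXA : Int := EXA / 2

def exaMul (a : Int) (b : Int) : Int := PySem.Int.floordiv (halfEXA + a * b) EXA

-- A's `while n != 0` loop; on Pre_ (n ≥ 0) Python's n // 2 equals Nat division, so the
-- loop counter is carried as a Nat (the n < 0 divergence is excluded by Pre_).
def exaPowLoop (n : Nat) (x : Int) (z : Int) : Int :=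
  if n = 0 then z
  else
    let x' := exaMul x x
    let z' := if n % 2 ≠ 0 then exaMul z x' else z
    exaPowLoop (n / 2) x' z'
decreasing_by exact Nat.div_lt_self (Nat.pos_of_ne_zero (by assumption)) (by norm_num)

def exaPow (x : Int) (n : Int) : Int :=
  let z := if PySem.Int.mod n 2 ≠ 0 then x else EXA
  exaPowLoop (PySem.Int.floordiv n 2).toNat x z

-- ===== PORT B =====
-- Pass 1: the list of (bit of n, current square); the Nat counter mirrors Source B's `while n != 0`
-- loop on the Pre_ domain n ≥ 0.
def exaPowSquares (n : Nat) (x : Int) : List (Bool × Int) :=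
  if n = 0 then []
  else (decide (n % 2 ≠ 0), x) :: exaPowSquares (n / 2) (exaMul x x)
decreasing_by exact Nat.div_lt_self (Nat.pos_of_ne_zero (by assumption)) (by norm_num)

def exaPow_alt (x : Int) (n : Int) : Int :=
  let squares := exaPowSquares n.toNat x
  squares.foldl (fun z p => if p.1 then exaMul z p.2 else z) EXA

-- ===== PRECONDITION & SPEC =====
-- Pre_ excludes n < 0: there Python A (and B) loop forever, returning nothing.
def Pre_exaPow (x : Int) (n : Int) : Prop := 0 ≤ n
instance (x : Int) (n : Int) : Decidable (Pre_exaPow x n) := by unfold Pre_exaPow; infer_instance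
def pvWitness_exaPow : Int × Int := (7, 5)

def Spec_exaPow (x : Int) (n : Int) (out : Int) : Prop := out = exaPow_alt x n
instance (x : Int) (n : Int) (out : Int) : Decidable (Spec_exaPow x n out) := by unfold Spec_exaPow; infer_instance

-- ===== CLAIM (what is proved, stated in full; the proofs are below) =====
def Claim_equal_exaPow : Prop := ∀ (x : Int) (n : Int), Dom_exaPow x n → Pre_exaPow x n → Spec_exaPow x n (exaPow x n)

-- ===== LEMMAS AND PROOFS =====

theorem exaMul_EXA (x : Int) : exaMul EXA x = x := by
  unfold exaMul halfEXA EXA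
  rw [PySem.Int.floordiv_eq_ediv_of_pos (by norm_num)]
  omega

-- The fold over the tail of the square list equals A's loop.
theorem fold_squares (m : Nat) (x z : Int) :
    (exaPowSquares m (exaMul x x)).foldl (fun z p => if p.1 then exaMul z p.2 else z) z
      = exaPowLoop m x z := by
  induction m using Nat.strong_induction_on generalizing x z with
  | _ m ih =>
    rw [exaPowSquares, exaPowLoop]
    by_cases h : m = 0
    · simp [h]
    · simp only [h, if_false, List.foldl_cons]
      rw [ih (m / 2) (Nat.div_lt_self (Nat.pos_of_ne_zero h) (by norm_num))]
      by_cases hb : m % 2 ≠ 0 <;> simp [hb]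

-- ===== VERDICT (by name: the statement is the Claim_ definition above) =====
theorem exaPow_spec : Claim_equal_exaPow := by
  intro x n _ hn
  unfold Spec_exaPow exaPow exaPow_alt
  obtain ⟨m, rfl⟩ := Int.eq_ofNat_of_zero_le hn
  rw [exaPowSquares]
  by_cases h : m = 0
  · subst h
    simp [exaPowLoop, PySem.Int.mod, PySem.Int.floordiv]
  · have hm2 : (PySem.Int.floordiv (m : Int) 2).toNat = m / 2 := by
      rw [PySem.Int.floordiv_eq_ediv_of_pos (by norm_num)]
      omega
    have hmod : (PySem.Int.mod (m : Int) 2 ≠ 0) ↔ (m % 2 ≠ 0) := by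
      rw [PySem.Int.mod_eq_emod_of_pos (by norm_num)]
      omega
    simp only [Int.toNat_natCast, h, if_false, List.foldl_cons, hm2]
    rw [fold_squares]
    by_cases hb : m % 2 ≠ 0
    · rw [if_pos (hmod.mpr hb)]; simp [hb, exaMul_EXA]
    · rw [if_neg (fun hc => hb (hmod.mp hc))]; simp [hb]
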